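-- pv_equiv track=rewrite | github.com/martintamare/adventofcode | 2021/01/solve.py | count_increases
-- ===== SOURCE A (Python) =====
-- def count_increases(data):
--     increase = 0
--     last = None
--     for d in data:
--         if last is None:
--             last = int(d)
--         elif int(d) > last:
--             increase += 1
--         last = int(d)
--     return increase
-- ===== SOURCE B (Python) =====
-- def count_increases(data):
--     xs = [int(d) for d in data]
--
--     def dc(lo, hi):
--         # increases strictly inside xs[lo:hi]
--         if hi - lo < 2:
--             return 0
--         mid = (lo + hi) // 2
--         boundary = 1 if xs[mid] > xs[mid - 1] else 0
--         return dc(lo, mid) + dc(mid, hi) + boundary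
--
--     return dc(0, len(xs))
-- ===== Notes on version B (the rewrite author's own statement) =====
-- stated objective: alternative
-- what changed: Replaces the stateful left-to-right loop (None sentinel + running last/counter) by a divide-and-conquer recursion that splits the index range at the midpoint, counts increases in each half and adds the single boundary comparison.
import Mathlib
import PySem

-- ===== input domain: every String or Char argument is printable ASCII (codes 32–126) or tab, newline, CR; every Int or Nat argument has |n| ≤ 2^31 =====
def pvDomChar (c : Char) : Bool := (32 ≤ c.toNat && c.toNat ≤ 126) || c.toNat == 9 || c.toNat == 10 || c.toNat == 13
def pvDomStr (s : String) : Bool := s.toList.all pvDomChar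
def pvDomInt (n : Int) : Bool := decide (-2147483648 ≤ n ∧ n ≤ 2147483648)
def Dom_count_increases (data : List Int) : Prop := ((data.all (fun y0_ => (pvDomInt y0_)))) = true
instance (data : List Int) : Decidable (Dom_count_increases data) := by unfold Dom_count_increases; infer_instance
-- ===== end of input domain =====

-- B counts increases by divide-and-conquer on the index range (two halves plus one boundary
-- comparison) instead of A's stateful single pass with a None sentinel; same value everywhere.

-- ===== PORT A =====
-- state = (increase, last); branches in A's order, last updated after the branch
def countIncStep (s : Int × Option Int) (d : Int) : Int × Option Int :=
  match s.2 with
  | none => (s.1, some d)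
  | some l => (if d > l then s.1 + 1 else s.1, some d)

def count_increases (data : List Int) : Int :=
  (data.foldl countIncStep (0, none)).1

-- ===== PORT B =====
-- xs[i] for an index the recursion keeps in range (1 ≤ mid < len); pyGet? is exact there
def dcGet (xs : List Int) (i : Nat) : Int := (PySem.List.pyGet? xs (i : Int)).getD 0

def dcCount (xs : List Int) (lo hi : Nat) : Int :=
  if hi - lo < 2 then 0
  else
    let mid := (lo + hi) / 2
    dcCount xs lo mid + dcCount xs mid hi
      + (if dcGet xs mid > dcGet xs (mid - 1) then 1 else 0)
  termination_by hi - lo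
  decreasing_by all_goals omega

def count_increases_alt (data : List Int) : Int := dcCount data 0 data.length

-- ===== PRECONDITION & SPEC =====
def Spec_count_increases (data : List Int) (out : Int) : Prop := out = count_increases_alt data
instance (data : List Int) (out : Int) : Decidable (Spec_count_increases data out) := by unfold Spec_count_increases; infer_instance

-- ===== CLAIM (what is proved, stated in full; the proofs are below) =====
def Claim_equal_count_increases : Prop := ∀ (data : List Int), Dom_count_increases data → Spec_count_increases data (count_increases data)

-- ===== LEMMAS AND PROOFS =====

-- index-count specification shared by both proofs: increases at indices lo+1 … hi-1
def idxCnt (xs : List Int) (lo hi : Nat) : Int :=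
  (((List.range' (lo + 1) (hi - (lo + 1))).countP
      (fun i => decide (xs.getD i 0 > xs.getD (i - 1) 0))) : Nat)

theorem dcGet_eq_getD (xs : List Int) (i : Nat) (h : i < xs.length) :
    dcGet xs i = xs.getD i 0 := by
  simp [dcGet, h, List.getD]

theorem dcCount_eq_idxCnt (xs : List Int) : ∀ (lo hi : Nat), hi ≤ xs.length →
    dcCount xs lo hi = idxCnt xs lo hi := by
  intro lo hi
  induction h : hi - lo using Nat.strong_induction_on generalizing lo hi with
  | _ n ih =>
    intro hhi
    rw [dcCount]
    by_cases hsmall : hi - lo < 2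
    · simp only [hsmall, if_true, idxCnt]
      have : hi - (lo + 1) = 0 := by omega
      simp [this]
    · simp only [hsmall, if_false]
      have hmid : lo < (lo + hi) / 2 ∧ (lo + hi) / 2 < hi := by omega
      set mid := (lo + hi) / 2 with hm
      rw [ih ((hi - lo) - (hi - mid)) (by omega) lo mid (by omega) (by omega),
          ih ((hi - lo) - (mid - lo)) (by omega) mid hi (by omega) hhi]
      rw [dcGet_eq_getD xs mid (by omega), dcGet_eq_getD xs (mid - 1) (by omega)]
      simp only [idxCnt]
      have key : List.range' (lo + 1) ((mid - (lo + 1)) + ((hi - (mid + 1)) + 1))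
          = List.range' (lo + 1) (mid - (lo + 1))
            ++ List.range' ((lo + 1) + 1 * (mid - (lo + 1))) ((hi - (mid + 1)) + 1) :=
        (List.range'_append).symm
      have e1 : (lo + 1) + 1 * (mid - (lo + 1)) = mid := by omega
      have e2 : (mid - (lo + 1)) + ((hi - (mid + 1)) + 1) = hi - (lo + 1) := by omega
      rw [e1, e2] at key
      rw [key, List.range'_succ, List.countP_append, List.countP_cons]
      push_cast
      by_cases hb : xs.getD mid 0 > xs.getD (mid - 1) 0 <;> simp [hb] <;> ring

-- A's loop invariant: after seeing 'last = l', the fold adds the number of increasing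
-- consecutive pairs in l :: ds
theorem countInc_loop (ds : List Int) : ∀ (l inc : Int),
    (List.foldl countIncStep (inc, some l) ds).1
      = inc + (((l :: ds).zip ds).countP (fun p => decide (p.2 > p.1)) : Nat) := by
  induction ds with
  | nil => intro l inc; simp
  | cons d ds ih =>
    intro l inc
    simp only [List.foldl_cons, countIncStep, List.zip_cons_cons, List.countP_cons, ih]
    by_cases h : d > l <;> simp [h] <;> ring

-- shift a range' spec by one
theorem countP_range'_shift (f : Nat → Bool) : ∀ (n s : Nat),
    (List.range' (s + 1) n).countP f = (List.range' s n).countP (fun i => f (i + 1)) := by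
  intro n
  induction n with
  | zero => intro s; simp
  | succ n ih =>
    intro s
    rw [List.range'_succ, List.range'_succ, List.countP_cons, List.countP_cons, ih]

-- the zip pair-count equals the index count over range' 1 (length of the tail)
theorem zip_eq_idx : ∀ (a : Int) (t : List Int),
    (((a :: t).zip t).countP (fun p => decide (p.2 > p.1)) : Int)
      = (((List.range' 1 t.length).countP
          (fun i => decide ((a :: t).getD i 0 > (a :: t).getD (i - 1) 0))) : Nat) := by
  intro a t
  induction t generalizing a with
  | nil => simp
  | cons b t ih =>
    simp only [List.zip_cons_cons, List.countP_cons, List.length_cons,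
      List.range'_succ, List.countP_cons]
    have h1 : (a :: b :: t).getD 1 0 = b := rfl
    have h0 : (a :: b :: t).getD 0 0 = a := rfl
    simp only [h1, h0]
    have hshift : (List.range' (1 + 1) t.length).countP
        (fun i => decide ((a :: b :: t).getD i 0 > (a :: b :: t).getD (i - 1) 0))
        = (List.range' 1 t.length).countP
          (fun i => decide ((b :: t).getD i 0 > (b :: t).getD (i - 1) 0)) := by
      rw [countP_range'_shift]
      apply List.countP_congr
      intro i hi
      have hi1 : 1 ≤ i := (List.mem_range'_1.mp hi).1
      have e1 : (a :: b :: t).getD (i + 1) 0 = (b :: t).getD i 0 := by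
        cases i with
        | zero => omega
        | succ j => rfl
      have e2 : (a :: b :: t).getD (i + 1 - 1) 0 = (b :: t).getD (i - 1) 0 := by
        cases i with
        | zero => omega
        | succ j => simp
      rw [e1, e2]
    rw [hshift]
    have := ih b
    push_cast at this ⊢
    rw [← this]

theorem count_increases_eq (data : List Int) :
    count_increases data = count_increases_alt data := by
  cases data with
  | nil =>
    simp only [count_increases, count_increases_alt, List.foldl_nil, List.length_nil]
    rw [dcCount]
    simp
  | cons l ds =>
    simp only [count_increases, count_increases_alt, List.foldl_cons, countIncStep]
    rw [countInc_loop, dcCount_eq_idxCnt (l :: ds) 0 (l :: ds).length le_rfl]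
    have : idxCnt (l :: ds) 0 (l :: ds).length
        = (((List.range' 1 ds.length).countP
            (fun i => decide ((l :: ds).getD i 0 > (l :: ds).getD (i - 1) 0))) : Nat) := by
      simp [idxCnt]
    rw [this, ← zip_eq_idx]
    simp

-- ===== VERDICT (by name: the statement is the Claim_ definition above) =====
theorem count_increases_spec : Claim_equal_count_increases := by
  intro data _
  exact count_increases_eq data
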